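-- pv_equiv track=rewrite | github.com/hamidahoderinwale/cursor-telemetry | components/dashboard/src/clio-integration/kura_bridge.py | _calculate_duration_distribution
-- ===== SOURCE A (Python) =====
-- from typing import List, Dict, Any, Optional
--
-- def _calculate_duration_distribution(sequences: List[Dict]) -> Dict[str, int]:
--     """Calculate duration distribution of sequences"""
--     durations = [sequence.get('duration', 0) for sequence in sequences]
--
--     distribution = {
--         'short': len([d for d in durations if d < 5]),  # < 5 minutes
--         'medium': len([d for d in durations if 5 <= d < 30]),  # 5-30 minutes
--         'long': len([d for d in durations if d >= 30])  # > 30 minutes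
--     }
--     return distribution
-- ===== SOURCE B (Python) =====
-- from typing import List, Dict
--
-- def _calculate_duration_distribution(sequences: List[Dict]) -> Dict[str, int]:
--     counts = {'short': 0, 'medium': 0, 'long': 0}
--     for sequence in sequences:
--         d = sequence.get('duration', 0)
--         if d < 5:
--             counts['short'] += 1
--         elif d < 30:
--             counts['medium'] += 1
--         else:
--             counts['long'] += 1
--     return counts
-- ===== Notes on version B (the rewrite author's own statement) =====
-- stated objective: simpler
-- what changed: Replaces the three filtering passes over a materialized durations list with a single loop that classifies each sequence's duration once and increments one of three counters.
import Mathlib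
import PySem

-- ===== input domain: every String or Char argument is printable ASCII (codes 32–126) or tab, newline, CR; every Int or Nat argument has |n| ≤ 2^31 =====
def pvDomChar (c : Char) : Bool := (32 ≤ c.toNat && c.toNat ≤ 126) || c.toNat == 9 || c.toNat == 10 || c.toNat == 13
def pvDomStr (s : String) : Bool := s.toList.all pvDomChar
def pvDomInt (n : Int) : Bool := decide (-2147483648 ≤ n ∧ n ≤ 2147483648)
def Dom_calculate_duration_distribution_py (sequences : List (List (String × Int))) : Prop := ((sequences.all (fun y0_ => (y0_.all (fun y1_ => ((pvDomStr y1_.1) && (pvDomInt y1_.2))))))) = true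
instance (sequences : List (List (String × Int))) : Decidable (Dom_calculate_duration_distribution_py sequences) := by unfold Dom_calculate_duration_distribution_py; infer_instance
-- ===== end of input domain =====

-- B replaces A's three filtering passes over a durations list by one loop with three counters (same values, simpler).

-- ===== PORT A =====
def calculate_duration_distribution_py (sequences : List (List (String × Int))) : List (String × Int) :=
  let durations := sequences.map (fun sequence => (PySem.Dict.ofList sequence).getD "duration" 0)
  [("short", ((durations.filter (fun d => d < 5)).length : Int)),
   ("medium", ((durations.filter (fun d => 5 ≤ d && d < 30)).length : Int)),
   ("long", ((durations.filter (fun d => 30 ≤ d)).length : Int))]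

-- ===== PORT B =====
def calculate_duration_distribution_py_alt (sequences : List (List (String × Int))) : List (String × Int) :=
  let counts := sequences.foldl (fun (acc : Int × Int × Int) sequence =>
    let d := (PySem.Dict.ofList sequence).getD "duration" 0
    if d < 5 then (acc.1 + 1, acc.2.1, acc.2.2)
    else if d < 30 then (acc.1, acc.2.1 + 1, acc.2.2)
    else (acc.1, acc.2.1, acc.2.2 + 1)) (0, 0, 0)
  [("short", counts.1), ("medium", counts.2.1), ("long", counts.2.2)]

-- ===== PRECONDITION & SPEC =====
def Spec_calculate_duration_distribution_py (sequences : List (List (String × Int))) (out : List (String × Int)) : Prop := out = calculate_duration_distribution_py_alt sequences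
instance (sequences : List (List (String × Int))) (out : List (String × Int)) : Decidable (Spec_calculate_duration_distribution_py sequences out) := by unfold Spec_calculate_duration_distribution_py; infer_instance

-- ===== CLAIM =====
def Claim_equal_calculate_duration_distribution_py : Prop := ∀ (sequences : List (List (String × Int))), Dom_calculate_duration_distribution_py sequences → Spec_calculate_duration_distribution_py sequences (calculate_duration_distribution_py sequences)

-- ===== LEMMAS AND PROOFS =====
theorem pv_fold_eq (seqs : List (List (String × Int))) (a b c : Int) :
    seqs.foldl (fun (acc : Int × Int × Int) sequence =>
      let d := (PySem.Dict.ofList sequence).getD "duration" 0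
      if d < 5 then (acc.1 + 1, acc.2.1, acc.2.2)
      else if d < 30 then (acc.1, acc.2.1 + 1, acc.2.2)
      else (acc.1, acc.2.1, acc.2.2 + 1)) (a, b, c) =
    (a + (((seqs.map (fun sequence => (PySem.Dict.ofList sequence).getD "duration" 0)).filter (fun d => d < 5)).length : Int),
     b + (((seqs.map (fun sequence => (PySem.Dict.ofList sequence).getD "duration" 0)).filter (fun d => 5 ≤ d && d < 30)).length : Int),
     c + (((seqs.map (fun sequence => (PySem.Dict.ofList sequence).getD "duration" 0)).filter (fun d => 30 ≤ d)).length : Int)) := by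
  induction seqs generalizing a b c with
  | nil => simp
  | cons s t ih =>
    simp only [List.foldl_cons, List.map_cons, List.filter_cons]
    set d := (PySem.Dict.ofList s).getD "duration" 0 with hd
    by_cases h1 : d < 5
    · have hb : ¬ (5 ≤ d) := by omega
      have hc : ¬ (30 ≤ d) := by omega
      simp [h1, hb, hc, ih, Prod.ext_iff]
      omega
    · by_cases h2 : d < 30
      · have hb : (5 ≤ d) := by omega
        have hc : ¬ (30 ≤ d) := by omega
        simp [h1, h2, hb, hc, ih, Prod.ext_iff]
        omega
      · have hc : (30 ≤ d) := by omega
        simp [h1, h2, hc, ih, Prod.ext_iff]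
        omega

-- ===== VERDICT =====
theorem calculate_duration_distribution_py_spec : Claim_equal_calculate_duration_distribution_py := by
  intro seqs _
  unfold Spec_calculate_duration_distribution_py calculate_duration_distribution_py calculate_duration_distribution_py_alt
  simp only [pv_fold_eq]
  simp
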